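-- pv_equiv track=rewrite | github.com/jdidion/fastq-vs-ubam | src/lib.py | nc_records
-- ===== SOURCE A (Python) =====
-- def nc_records(records):
--     A = C = G = T = 0
--     for record in records:
--         for nuc in record[1]:
--             if nuc == "A":
--                 A += 1
--             elif nuc == "C":
--                 C += 1
--             elif nuc == "G":
--                 G += 1
--             elif nuc == "T":
--                 T += 1
--             else:
--                 raise Exception(f"unsupported nucleotide {nuc}")
--
--     return (A, C, G, T)
-- ===== SOURCE B (Python) =====
-- def nc_records(records):
--     A = C = G = T = 0
--     for record in records:
--         seq = record[1]
--         a = seq.count("A")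
--         c = seq.count("C")
--         g = seq.count("G")
--         t = seq.count("T")
--         if a + c + g + t != len(seq):
--             nuc = next(ch for ch in seq if ch not in "ACGT")
--             raise Exception(f"unsupported nucleotide {nuc}")
--         A += a
--         C += c
--         G += g
--         T += t
--     return (A, C, G, T)
-- ===== Notes on version B (the rewrite author's own statement) =====
-- stated objective: idiomatic
-- what changed: Replaces A's branched per-character Python loop with four C-level str.count scans per sequence plus a length check to detect (and locate, in order) the first unsupported nucleotide.
import Mathlib
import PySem

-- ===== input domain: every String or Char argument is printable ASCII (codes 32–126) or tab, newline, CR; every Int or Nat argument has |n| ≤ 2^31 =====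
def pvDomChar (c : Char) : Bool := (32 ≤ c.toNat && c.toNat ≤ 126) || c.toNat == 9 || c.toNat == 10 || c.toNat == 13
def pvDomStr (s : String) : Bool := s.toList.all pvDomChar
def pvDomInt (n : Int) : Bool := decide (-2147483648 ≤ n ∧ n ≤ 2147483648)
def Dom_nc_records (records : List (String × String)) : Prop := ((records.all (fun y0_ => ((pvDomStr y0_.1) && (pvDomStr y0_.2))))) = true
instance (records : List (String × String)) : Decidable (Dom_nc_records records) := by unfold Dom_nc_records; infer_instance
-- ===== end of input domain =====

-- B counts each nucleotide with str.count per sequence instead of A's branched per-character loop; objective: idiomatic (C-level scans in Python). Equal on Pre_ (no unsupported nucleotide, where A raises).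

-- ===== PORT A =====
-- per-character step of A's inner loop; `none` = the Python raised (excluded by Pre_)
def ncA_step (st : Option (Int × Int × Int × Int)) (nuc : Char) : Option (Int × Int × Int × Int) :=
  match st with
  | none => none
  | some (a, c, g, t) =>
    if nuc = 'A' then some (a + 1, c, g, t)
    else if nuc = 'C' then some (a, c + 1, g, t)
    else if nuc = 'G' then some (a, c, g + 1, t)
    else if nuc = 'T' then some (a, c, g, t + 1)
    else none

def nc_records (records : List (String × String)) : Int × Int × Int × Int :=
  match records.foldl (fun st record => record.2.toList.foldl ncA_step st) (some (0, 0, 0, 0)) with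
  | some v => v
  | none => (0, 0, 0, 0)   -- unreachable under Pre_ (Python raises here)

-- ===== PORT B =====
-- per-record step of B's loop: four str.count scans, then the length check; `none` = raised
def ncB_step (st : Option (Int × Int × Int × Int)) (record : String × String) : Option (Int × Int × Int × Int) :=
  match st with
  | none => none
  | some (A, C, G, T) =>
    let seq := record.2
    let a : Int := PySem.Str.count seq "A"
    let c : Int := PySem.Str.count seq "C"
    let g : Int := PySem.Str.count seq "G"
    let t : Int := PySem.Str.count seq "T"
    if a + c + g + t ≠ PySem.Str.len seq then none
    else some (A + a, C + c, G + g, T + t)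

def nc_records_alt (records : List (String × String)) : Int × Int × Int × Int :=
  match records.foldl ncB_step (some (0, 0, 0, 0)) with
  | some v => v
  | none => (0, 0, 0, 0)   -- unreachable under Pre_ (Python raises here)

-- ===== PRECONDITION & SPEC =====
-- Pre_ excludes exactly the inputs containing a character other than A/C/G/T in a sequence, on which the Python A raises Exception.
def Pre_nc_records (records : List (String × String)) : Prop :=
  (records.all (fun r => r.2.toList.all (fun ch => ch ∈ (['A', 'C', 'G', 'T'] : List Char)))) = true
instance (records : List (String × String)) : Decidable (Pre_nc_records records) := by unfold Pre_nc_records; infer_instance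
def pvWitness_nc_records : (List (String × String)) := [("r1", "ACGTT"), ("r2", "GGA"), ("r3", "")]
def Spec_nc_records (records : List (String × String)) (out : Int × Int × Int × Int) : Prop := out = nc_records_alt records
instance (records : List (String × String)) (out : Int × Int × Int × Int) : Decidable (Spec_nc_records records out) := by unfold Spec_nc_records; infer_instance

-- ===== CLAIM (what is proved, stated in full; the proofs are below) =====
def Claim_equal_nc_records : Prop := ∀ (records : List (String × String)), Dom_nc_records records → Pre_nc_records records → Spec_nc_records records (nc_records records)

-- ===== LEMMAS AND PROOFS =====

-- fuel-generalised evaluation of PySem.Chars.count.go for a single-character needle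
theorem go_single (c : Char) : ∀ (l : List Char) (fuel acc : Nat), l.length ≤ fuel →
    PySem.Chars.count.go [c] fuel l acc = acc + l.count c := by
  intro l
  induction l with
  | nil => intro fuel acc h; cases fuel <;> simp [PySem.Chars.count.go]
  | cons x xs ih =>
    intro fuel acc h
    cases fuel with
    | zero => simp at h
    | succ f =>
      simp only [PySem.Chars.count.go, List.isPrefixOf]
      by_cases hx : x = c
      · subst hx
        simp [ih _ _ (by simpa using h)]
        omega
      · simp [(by simpa using Ne.symm hx : (c == x) = false),
          ih _ _ (by simpa using Nat.le_of_succ_le_succ h), hx]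

theorem str_count_single (s : String) (c : Char) (hc : (String.ofList [c]).toList = [c]) :
    PySem.Str.count s (String.ofList [c]) = s.toList.count c := by
  rw [show PySem.Str.count s (String.ofList [c]) = PySem.Chars.count s.toList (String.ofList [c]).toList from rfl,
      hc, PySem.Chars.count]
  rw [if_neg (by simp)]
  simpa using go_single c s.toList s.toList.length 0 (le_refl _)

-- A's inner loop over a valid sequence adds the four character counts
theorem ncA_loop (l : List Char) (hv : l.all (fun ch => ch ∈ (['A', 'C', 'G', 'T'] : List Char)) = true) :
    ∀ a c g t : Int, l.foldl ncA_step (some (a, c, g, t)) =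
      some (a + l.count 'A', c + l.count 'C', g + l.count 'G', t + l.count 'T') := by
  induction l with
  | nil => intro a c g t; simp
  | cons x xs ih =>
    intro a c g t
    simp only [List.all_cons, Bool.and_eq_true] at hv
    have hxs := ih hv.2
    have hx := hv.1
    simp only [List.foldl_cons]
    rcases (by simpa using hx : x = 'A' ∨ x = 'C' ∨ x = 'G' ∨ x = 'T') with rfl | rfl | rfl | rfl <;>
      simp [ncA_step, hxs] <;> ring_nf

-- on a valid sequence the four counts sum to the length
theorem counts_sum (l : List Char) (hv : l.all (fun ch => ch ∈ (['A', 'C', 'G', 'T'] : List Char)) = true) :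
    l.count 'A' + l.count 'C' + l.count 'G' + l.count 'T' = l.length := by
  induction l with
  | nil => simp
  | cons x xs ih =>
    simp only [List.all_cons, Bool.and_eq_true] at hv
    have := ih hv.2
    rcases (by simpa using hv.1 : x = 'A' ∨ x = 'C' ∨ x = 'G' ∨ x = 'T') with rfl | rfl | rfl | rfl <;>
      simp <;> omega

-- the two per-record steps agree on valid records
theorem step_eq (r : String × String) (hv : r.2.toList.all (fun ch => ch ∈ (['A', 'C', 'G', 'T'] : List Char)) = true)
    (a c g t : Int) :
    r.2.toList.foldl ncA_step (some (a, c, g, t)) = ncB_step (some (a, c, g, t)) r := by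
  rw [ncA_loop _ hv]
  have hA := str_count_single r.2 'A' (by decide)
  have hC := str_count_single r.2 'C' (by decide)
  have hG := str_count_single r.2 'G' (by decide)
  have hT := str_count_single r.2 'T' (by decide)
  have hsum := counts_sum r.2.toList hv
  simp only [ncB_step, show ("A" : String) = String.ofList ['A'] from rfl,
    show ("C" : String) = String.ofList ['C'] from rfl,
    show ("G" : String) = String.ofList ['G'] from rfl,
    show ("T" : String) = String.ofList ['T'] from rfl, hA, hC, hG, hT,
    PySem.Str.len_eq]
  rw [if_neg (by omega)]

theorem fold_eq (records : List (String × String))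
    (hv : (records.all (fun r => r.2.toList.all (fun ch => ch ∈ (['A', 'C', 'G', 'T'] : List Char)))) = true) :
    ∀ a c g t : Int,
      records.foldl (fun st record => record.2.toList.foldl ncA_step st) (some (a, c, g, t)) =
      records.foldl ncB_step (some (a, c, g, t)) := by
  induction records with
  | nil => intro a c g t; rfl
  | cons r rs ih =>
    intro a c g t
    simp only [List.all_cons, Bool.and_eq_true] at hv
    have hB : ncB_step (some (a, c, g, t)) r =
        some (a + r.2.toList.count 'A', c + r.2.toList.count 'C', g + r.2.toList.count 'G', t + r.2.toList.count 'T') :=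
      (step_eq r hv.1 a c g t).symm.trans (ncA_loop _ hv.1 a c g t)
    simp only [List.foldl_cons, step_eq r hv.1 a c g t, hB]
    exact ih hv.2 _ _ _ _

-- ===== VERDICT (by name: the statement is the Claim_ definition above) =====
theorem nc_records_spec : Claim_equal_nc_records := by
  intro records _ hpre
  unfold Spec_nc_records nc_records nc_records_alt
  rw [fold_eq records hpre]
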